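-- pv_equiv track=rewrite | github.com/jm-morani/compet | google-code-jam/2022/round-1a/ex1/solve.py | resoudre
-- ===== SOURCE A (Python) =====
-- def parcourir(S):
--     S += '@'
--     lettre, nb = S[0], 1
--     for suivante in S[1:]:
--         if lettre == suivante:
--             nb += 1
--         else:
--             yield lettre, nb, suivante
--             lettre, nb = suivante, 1
--
-- def resoudre(S):
--     solution = ''
--
--     for lettre, nb, suivante in parcourir(S):
--         if lettre < suivante:
--             solution += 2 * nb * lettre
--         else:
--             solution += nb * lettre
--
--     return solution
-- ===== SOURCE B (Python) =====
-- def resoudre(S):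
--     out = []
--     boost = False
--     for i in range(len(S) - 1, -1, -1):
--         nxt = S[i + 1] if i + 1 < len(S) else '@'
--         if S[i] < nxt:
--             boost = True
--         elif S[i] != nxt:
--             boost = False
--         out.append(S[i] * 2 if boost else S[i])
--     return ''.join(reversed(out))
-- ===== Notes on version B (the rewrite author's own statement) =====
-- stated objective: simpler
-- what changed: Replaces the run-grouping generator plus per-run emission with a single right-to-left per-character pass that carries one boolean 'double this char' flag.
-- intended difference: On strings ending in '@' A silently drops the whole trailing run of '@' characters (they merge with A's '@' sentinel and the final run is never yielded), e.g. resoudre('x@@') = 'x'; B emits them unchanged ('x@@'), which is the intended expansion since no input character should disappear. — e.g. on resoudre("x@"): A returns "x", B returns "x@"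
import Mathlib
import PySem

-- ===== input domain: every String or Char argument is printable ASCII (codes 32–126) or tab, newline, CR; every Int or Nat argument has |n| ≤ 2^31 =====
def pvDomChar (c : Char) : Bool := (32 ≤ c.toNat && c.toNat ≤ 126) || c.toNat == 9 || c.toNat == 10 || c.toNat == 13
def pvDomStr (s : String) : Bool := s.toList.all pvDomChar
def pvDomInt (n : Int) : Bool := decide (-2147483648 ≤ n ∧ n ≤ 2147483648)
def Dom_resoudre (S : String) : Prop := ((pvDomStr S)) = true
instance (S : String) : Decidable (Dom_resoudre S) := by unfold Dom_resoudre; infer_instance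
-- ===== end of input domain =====

-- B replaces A's run-grouping generator with a single right-to-left per-character pass carrying one boolean flag (objective: simpler).


-- ===== PORT A =====
-- the for-loop of `resoudre` fused with the generator `parcourir`: state (lettre, nb, solution)
def aGo (lettre : Char) (nb : Nat) (rest : List Char) (acc : List Char) : List Char :=
  match rest with
  | [] => acc
  | s :: rest' =>
    if lettre == s then aGo lettre (nb + 1) rest' acc
    else aGo s 1 rest'
      (acc ++ (if lettre < s then List.replicate (2 * nb) lettre else List.replicate nb lettre))

def resoudre (S : String) : String :=
  match S.toList ++ ['@'] with
  | [] => ""        -- unreachable: the list ends with '@'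
  | c :: rest => String.ofList (aGo c 1 rest [])

-- ===== PORT B =====
-- the right-to-left loop of Source B as structural recursion; returns (boost flag at the head, output for this suffix)
def bGo (l : List Char) : Bool × List Char :=
  match l with
  | [] => (false, [])
  | c :: rest =>
    let boost := if c < rest.head?.getD '@' then true
                 else if c == rest.head?.getD '@' then (bGo rest).1 else false
    (boost, (if boost then [c, c] else [c]) ++ (bGo rest).2)

def resoudre_alt (S : String) : String := String.ofList (bGo S.toList).2

-- ===== PRECONDITION & SPEC =====
-- A silently drops a trailing run of '@' characters (it merges with A's appended '@' sentinel and the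
-- final run of the generator is never yielded); B emits it unchanged, the intended expansion.
def D_resoudre (S : String) : Prop := S.toList.getLast? = some '@'
instance (S : String) : Decidable (D_resoudre S) := by unfold D_resoudre; infer_instance

def Spec_resoudre (S : String) (out : String) : Prop := ¬ D_resoudre S → out = resoudre_alt S
instance (S : String) (out : String) : Decidable (Spec_resoudre S out) := by unfold Spec_resoudre; infer_instance

def pvDiffWitness_resoudre : String := "x@"
def pvDiffWitnessOut_resoudre : String × String := ("x", "x@")

-- ===== CLAIM (what is proved, stated in full; the proofs are below) =====
def Claim_unchanged_resoudre : Prop := ∀ (S : String), Dom_resoudre S → Spec_resoudre S (resoudre S)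
def Claim_exact_resoudre : Prop := ∀ (S : String), Dom_resoudre S → D_resoudre S → resoudre S ≠ resoudre_alt S
def Claim_changed_resoudre : Prop := Dom_resoudre (pvDiffWitness_resoudre) ∧ D_resoudre (pvDiffWitness_resoudre) ∧ resoudre (pvDiffWitness_resoudre) = pvDiffWitnessOut_resoudre.1 ∧ resoudre_alt (pvDiffWitness_resoudre) = pvDiffWitnessOut_resoudre.2 ∧ pvDiffWitnessOut_resoudre.1 ≠ pvDiffWitnessOut_resoudre.2

-- ===== LEMMAS AND PROOFS =====

theorem aGo_nil (lettre : Char) (nb : Nat) (acc : List Char) :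
    aGo lettre nb [] acc = acc := rfl

theorem aGo_cons (lettre s : Char) (nb : Nat) (rest' acc : List Char) :
    aGo lettre nb (s :: rest') acc =
      if lettre == s then aGo lettre (nb + 1) rest' acc
      else aGo s 1 rest'
        (acc ++ (if lettre < s then List.replicate (2 * nb) lettre else List.replicate nb lettre)) := rfl

theorem bGo_cons (c : Char) (rest : List Char) :
    bGo (c :: rest) =
      ((if c < rest.head?.getD '@' then true else if c == rest.head?.getD '@' then (bGo rest).1 else false),
       (if (if c < rest.head?.getD '@' then true else if c == rest.head?.getD '@' then (bGo rest).1 else false)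
          then [c, c] else [c]) ++ (bGo rest).2) := rfl

-- aGo's accumulator is pure output: it can be pulled out front
theorem aGo_acc (rest : List Char) : ∀ (lettre : Char) (nb : Nat) (acc : List Char),
    aGo lettre nb rest acc = acc ++ aGo lettre nb rest [] := by
  induction rest with
  | nil => intro lettre nb acc; rw [aGo_nil, aGo_nil, List.append_nil]
  | cons s rest' ih =>
    intro lettre nb acc
    rw [aGo_cons, aGo_cons]
    by_cases h : (lettre == s) = true
    · rw [if_pos h, if_pos h]; exact ih lettre (nb + 1) acc
    · rw [if_neg h, if_neg h,
        ih s 1 (acc ++ (if lettre < s then List.replicate (2 * nb) lettre else List.replicate nb lettre)),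
        ih s 1 ([] ++ (if lettre < s then List.replicate (2 * nb) lettre else List.replicate nb lettre)),
        List.nil_append, List.append_assoc]

-- bGo on a maximal run: every copy gets the flag of the comparison with the first following different char
theorem bGo_run (c : Char) (rest : List Char) (h : c ≠ rest.head?.getD '@') : ∀ (nb : Nat),
    bGo (List.replicate (nb + 1) c ++ rest) =
      (decide (c < rest.head?.getD '@'),
       (if c < rest.head?.getD '@' then List.replicate (2 * (nb + 1)) c else List.replicate (nb + 1) c)
         ++ (bGo rest).2) := by
  intro nb
  have hne : (c == rest.head?.getD '@') = false := by simpa using h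
  induction nb with
  | zero =>
    rw [show List.replicate 1 c ++ rest = c :: rest from rfl, bGo_cons, hne]
    by_cases hlt : c < rest.head?.getD '@'
    · simp [hlt, List.replicate]
    · simp [hlt, List.replicate]
  | succ k ih =>
    have hcons : List.replicate (k + 1 + 1) c ++ rest = c :: (List.replicate (k + 1) c ++ rest) := by
      simp [List.replicate]
    have hhead : (List.replicate (k + 1) c ++ rest).head?.getD '@' = c := by
      simp [List.replicate]
    rw [hcons, bGo_cons, ih, hhead, if_neg (lt_irrefl c)]
    simp only [beq_self_eq_true, if_true]
    by_cases hlt : c < rest.head?.getD '@'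
    · simp only [hlt, decide_true, if_true, Prod.mk.injEq, true_and]
      show List.replicate 2 c ++ (List.replicate (2 * (k + 1)) c ++ (bGo rest).2) = _
      rw [← List.append_assoc, ← List.replicate_add]
      congr 2
      omega
    · simp only [hlt, decide_false, Bool.false_eq_true, if_false, Prod.mk.injEq, true_and]
      show List.replicate 1 c ++ (List.replicate (k + 1) c ++ (bGo rest).2) = _
      rw [← List.append_assoc, ← List.replicate_add, Nat.add_comm 1 (k + 1)]

-- aGo consumes a run of '@' merged with the sentinel without emitting anything
theorem aGo_allAt : ∀ (k nb : Nat) (acc : List Char),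
    aGo '@' nb (List.replicate k '@' ++ ['@']) acc = acc := by
  intro k
  induction k with
  | zero =>
    intro nb acc
    rw [List.replicate_zero, List.nil_append, show (['@'] : List Char) = '@' :: [] from rfl,
      aGo_cons, if_pos (beq_self_eq_true '@'), aGo_nil]
  | succ k' ih =>
    intro nb acc
    rw [show List.replicate (k' + 1) '@' ++ ['@'] = '@' :: (List.replicate k' '@' ++ ['@']) from by
        simp [List.replicate], aGo_cons, if_pos (beq_self_eq_true '@')]
    exact ih (nb + 1) acc

-- the heart: A's fused loop equals B's pass on the part before the trailing '@' run, for any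
-- in-flight run (lettre, nb+1), suffix M not ending in '@', and k trailing '@'s (A drops those)
theorem aGo_eq_bGo (M : List Char) : ∀ (lettre : Char) (nb k : Nat),
    M.getLastD lettre ≠ '@' →
    aGo lettre (nb + 1) (M ++ (List.replicate k '@' ++ ['@'])) [] =
      (bGo (List.replicate (nb + 1) lettre ++ M)).2 := by
  induction M with
  | nil =>
    intro lettre nb k h
    simp only [List.getLastD] at h
    have hne : (lettre == '@') = false := by simpa using h
    have hb := bGo_run lettre [] (by simpa using h) nb
    rw [List.append_nil] at hb
    rw [List.nil_append, List.append_nil, hb]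
    cases k with
    | zero =>
      rw [List.replicate_zero, List.nil_append,
        show (['@'] : List Char) = '@' :: [] from rfl, aGo_cons, if_neg (by simp [hne]), aGo_nil,
        List.nil_append]
      show _ = _ ++ (bGo []).2
      rw [show (bGo []).2 = [] from rfl, List.append_nil]
      rfl
    | succ k' =>
      rw [show List.replicate (k' + 1) '@' ++ ['@'] = '@' :: (List.replicate k' '@' ++ ['@']) from by
          simp [List.replicate], aGo_cons, if_neg (by simp [hne]), aGo_allAt, List.nil_append]
      show _ = _ ++ (bGo []).2
      rw [show (bGo []).2 = [] from rfl, List.append_nil]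
      rfl
  | cons s M' ih =>
    intro lettre nb k h
    have h' : M'.getLastD s ≠ '@' := by
      cases M' with
      | nil => simpa [List.getLastD] using h
      | cons a l => simpa [List.getLastD] using h
    rw [List.cons_append, aGo_cons]
    by_cases he : (lettre == s) = true
    · have heq : lettre = s := by simpa using he
      subst heq
      rw [if_pos he]
      have hrep : List.replicate (nb + 1 + 1) lettre ++ M'
          = List.replicate (nb + 1) lettre ++ lettre :: M' := by
        rw [List.replicate_succ', List.append_assoc]
        rfl
      rw [← hrep]
      exact ih lettre (nb + 1) k h'
    · rw [if_neg he, List.nil_append, aGo_acc]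
      have ihs := ih s 0 k h'
      simp only [Nat.zero_add, List.replicate_one, List.singleton_append] at ihs
      rw [ihs]
      have hne : lettre ≠ (s :: M').head?.getD '@' := by simpa using he
      rw [bGo_run lettre (s :: M') hne nb]
      rfl

-- (c :: rest) ends with '@' iff rest.getLastD c = '@'
theorem getLast?_cons_getLastD (c : Char) (rest : List Char) :
    (c :: rest).getLast? = some (rest.getLastD c) := by
  induction rest generalizing c with
  | nil => rfl
  | cons a l ih => rw [List.getLast?_cons_cons, ih, List.getLastD_cons]


-- a run of '@'s: B keeps every character, flag false
theorem bGo_allAt : ∀ (k : Nat), bGo (List.replicate k '@') = (false, List.replicate k '@') := by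
  intro k
  induction k with
  | zero => rfl
  | succ k' ih =>
    rw [List.replicate_succ, bGo_cons, ih]
    have hh : (List.replicate k' '@').head?.getD '@' = '@' := by cases k' <;> simp [List.replicate]
    rw [hh, if_neg (lt_irrefl '@')]
    simp

theorem head_append_at (P : List Char) (k : Nat) :
    (P ++ List.replicate k '@').head?.getD '@' = P.head?.getD '@' := by
  cases P <;> cases k <;> simp [List.replicate]

-- appending a run of '@'s only appends it to B's output
theorem bGo_append_at (P : List Char) (k : Nat) :
    bGo (P ++ List.replicate k '@') = ((bGo P).1, (bGo P).2 ++ List.replicate k '@') := by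
  induction P with
  | nil =>
    rw [List.nil_append, bGo_allAt]
    rfl
  | cons c P' ih =>
    rw [List.cons_append, bGo_cons, bGo_cons, ih, head_append_at, List.append_assoc]

theorem dropWhile_head_false (p : Char → Bool) (l : List Char) : ∀ (a : Char),
    (l.dropWhile p).head? = some a → p a = false := by
  induction l with
  | nil => intro a h; simp [List.dropWhile] at h
  | cons b l' ih =>
    intro a h
    by_cases hb : p b = true
    · simp only [List.dropWhile, hb] at h
      exact ih a h
    · simp only [List.dropWhile, hb] at h
      simp only [List.head?_cons, Option.some.injEq] at h
      subst h
      simpa using hb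

theorem takeWhile_at_replicate (l : List Char) :
    l.takeWhile (fun x => x == '@') = List.replicate (l.takeWhile (fun x => x == '@')).length '@' := by
  induction l with
  | nil => rfl
  | cons b l' ih =>
    by_cases hb : (b == '@') = true
    · have hbe : b = '@' := by simpa using hb
      rw [List.takeWhile_cons, if_pos hb, List.length_cons, List.replicate_succ, hbe, ← ih]
    · rw [List.takeWhile_cons, if_neg (by simpa using hb)]
      rfl

-- reducing A's port once the head of the character list is exposed
theorem resoudre_cons (S : String) (c : Char) (rest : List Char) (h : S.toList = c :: rest) :
    resoudre S = String.ofList (aGo c 1 (rest ++ ['@']) []) := by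
  unfold resoudre
  rw [h, List.cons_append]

-- ===== VERDICT (by name: the statement is the Claim_ definition above) =====
theorem resoudre_spec : Claim_unchanged_resoudre := by
  intro S _ hD
  unfold D_resoudre at hD
  show resoudre S = resoudre_alt S
  unfold resoudre resoudre_alt
  cases hL : S.toList with
  | nil => rfl
  | cons c rest =>
    rw [hL] at hD
    rw [getLast?_cons_getLastD] at hD
    have hlast : rest.getLastD c ≠ '@' := by
      intro hcon; exact hD (by rw [hcon])
    have key := aGo_eq_bGo rest c 0 0 hlast
    simp only [Nat.zero_add, List.replicate_zero, List.nil_append, List.replicate_one,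
      List.singleton_append] at key
    simp only [List.cons_append]
    rw [key]

theorem resoudre_changed : Claim_changed_resoudre := by unfold Claim_changed_resoudre; decide

theorem resoudre_tight : Claim_exact_resoudre := by
  intro S _ hD hEq
  unfold D_resoudre at hD
  have hhead : S.toList.reverse.head? = some '@' := by
    rw [List.head?_reverse]; exact hD
  have hsplit := List.takeWhile_append_dropWhile (p := fun x => x == '@') (l := S.toList.reverse)
  have hrep := takeWhile_at_replicate S.toList.reverse
  have hL : S.toList = (S.toList.reverse.dropWhile (fun x => x == '@')).reverse
      ++ List.replicate (S.toList.reverse.takeWhile (fun x => x == '@')).length '@' := by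
    conv_lhs => rw [← List.reverse_reverse S.toList, ← hsplit]
    rw [List.reverse_append]
    congr 1
    rw [hrep, List.reverse_replicate, List.length_replicate]
  have hm1 : 1 ≤ (S.toList.reverse.takeWhile (fun x => x == '@')).length := by
    cases hrev : S.toList.reverse with
    | nil => rw [hrev] at hhead; simp at hhead
    | cons a R' =>
      rw [hrev] at hhead
      have ha : a = '@' := by simpa using hhead
      rw [List.takeWhile_cons, if_pos (by simp [ha]), List.length_cons]
      omega
  obtain ⟨m, hmdef⟩ : ∃ m, (S.toList.reverse.takeWhile (fun x => x == '@')).length = m := ⟨_, rfl⟩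
  rw [hmdef] at hL hm1
  cases hP : (S.toList.reverse.dropWhile (fun x => x == '@')).reverse with
  | nil =>
    rw [hP, List.nil_append] at hL
    obtain ⟨m', hm'⟩ : ∃ m', m = m' + 1 := ⟨m - 1, by omega⟩
    rw [hm', List.replicate_succ] at hL
    rw [resoudre_cons S '@' (List.replicate m' '@') hL] at hEq
    unfold resoudre_alt at hEq
    rw [aGo_allAt, hL, ← List.replicate_succ, bGo_allAt] at hEq
    have := congrArg (fun t => t.toList.length) hEq
    simp at this
  | cons d P' =>
    have hgl : (S.toList.reverse.dropWhile (fun x => x == '@')).head? = some (P'.getLastD d) := by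
      rw [← List.getLast?_reverse, hP, getLast?_cons_getLastD]
    have hne : P'.getLastD d ≠ '@' := by
      have := dropWhile_head_false _ _ _ hgl
      simpa using this
    rw [hP] at hL
    rw [resoudre_cons S d (P' ++ List.replicate m '@') (by rw [hL]; rfl)] at hEq
    rw [List.append_assoc] at hEq
    have key := aGo_eq_bGo P' d 0 m hne
    simp only [Nat.zero_add, List.replicate_one, List.singleton_append] at key
    rw [key] at hEq
    unfold resoudre_alt at hEq
    rw [hL, bGo_append_at] at hEq
    have := congrArg (fun t => t.toList.length) hEq
    simp at this
    omega
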